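-- pv_equiv track=rewrite | github.com/jaeronge/study | case/case1.py | _pair_list
-- ===== SOURCE A (Python) =====
-- def _pair_list(s):
--     pairs = []
--     for l in range(0, len(s) - 1):
--         pair = s[l] + s[l + 1]
--         if pair.isalpha() is False:
--             continue
--         pairs.append(pair)
--     return pairs
-- ===== SOURCE B (Python) =====
-- def _pair_list(s):
--     # Partition s into maximal runs of alphabetic characters, then emit the
--     # adjacent pairs inside each run.
--     runs = []
--     cur = []
--     for ch in s:
--         if ch.isalpha():
--             cur.append(ch)
--         else:
--             if cur:
--                 runs.append(cur)
--             cur = []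
--     if cur:
--         runs.append(cur)
--     return [x + y for run in runs for x, y in zip(run, run[1:])]
-- ===== Notes on version B (the rewrite author's own statement) =====
-- stated objective: alternative
-- what changed: Instead of testing isalpha on every two-character window indexed from range(len(s)-1), B first partitions the string into maximal runs of alphabetic characters and then emits the adjacent pairs inside each run.
import Mathlib
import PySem

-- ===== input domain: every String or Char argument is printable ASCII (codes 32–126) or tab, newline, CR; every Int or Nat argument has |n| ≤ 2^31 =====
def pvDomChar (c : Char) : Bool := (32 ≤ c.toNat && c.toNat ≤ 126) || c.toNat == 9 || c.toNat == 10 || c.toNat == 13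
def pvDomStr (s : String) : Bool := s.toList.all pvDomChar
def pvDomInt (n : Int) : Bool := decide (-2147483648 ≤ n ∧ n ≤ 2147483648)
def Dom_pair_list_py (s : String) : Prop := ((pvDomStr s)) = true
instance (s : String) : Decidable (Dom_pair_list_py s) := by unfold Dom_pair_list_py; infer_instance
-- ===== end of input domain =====

-- B replaces A's indexed two-character-window scan by a partition of the string
-- into maximal alphabetic runs followed by pair generation inside each run
-- (objective: alternative decomposition, same cost).

-- ===== PORT A =====
-- for l in range(0, len(s) - 1): pair = s[l] + s[l+1]; if pair.isalpha() is False: continue; pairs.append(pair)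
-- (indices l and l+1 are always in range, so the total pyGetD with a dummy default is exact)
def pair_list_py (s : String) : List String :=
  (PySem.List.pyRange 0 (PySem.Str.len s - 1)).foldl
    (fun pairs l =>
      let pair : List Char := [PySem.List.pyGetD s.toList l ' ', PySem.List.pyGetD s.toList (l + 1) ' ']
      if PySem.Chars.strIsalpha pair = false then pairs
      else pairs ++ [String.ofList pair])
    []

-- ===== PORT B =====
-- the run-accumulator loop of Source B: cur collects the current alphabetic run, flushed on a non-letter
def pvRuns (cs : List Char) (cur : List Char) : List (List Char) :=
  match cs with
  | [] => if cur.isEmpty then [] else [cur]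
  | c :: t =>
    if PySem.Chars.isalpha c then pvRuns t (cur ++ [c])
    else if cur.isEmpty then pvRuns t []
    else cur :: pvRuns t []

-- [x + y for x, y in zip(run, run[1:])]
def pvRunPairs (run : List Char) : List String :=
  (run.zip run.tail).map (fun p => String.ofList [p.1, p.2])

def pair_list_py_alt (s : String) : List String :=
  (pvRuns s.toList []).flatMap pvRunPairs

-- ===== PRECONDITION & SPEC =====
def Spec_pair_list_py (s : String) (out : List String) : Prop := out = pair_list_py_alt s
instance (s : String) (out : List String) : Decidable (Spec_pair_list_py s out) := by unfold Spec_pair_list_py; infer_instance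

-- ===== CLAIM (what is proved, stated in full; the proofs are below) =====
def Claim_equal_pair_list_py : Prop := ∀ (s : String), Dom_pair_list_py s → Spec_pair_list_py s (pair_list_py s)

-- ===== LEMMAS AND PROOFS =====

-- common characterisation: the adjacent all-alphabetic pairs of a character list
def pairsA : List Char → List String
  | a :: b :: t =>
    (if PySem.Chars.isalpha a && PySem.Chars.isalpha b then [String.ofList [a, b]] else []) ++ pairsA (b :: t)
  | _ => []

-- A's window test and window value at Nat index k
def pA_p (cs : List Char) (k : Nat) : Bool :=
  PySem.Chars.strIsalpha [cs.getD k ' ', cs.getD (k + 1) ' ']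
def pA_f (cs : List Char) (k : Nat) : String :=
  String.ofList [cs.getD k ' ', cs.getD (k + 1) ' ']

lemma step_flip (p : Int → Bool) (f : Int → String) :
    (fun (pairs : List String) l => if p l = false then pairs else pairs ++ [f l]) =
    (fun (pairs : List String) l => if p l = true then pairs ++ [f l] else pairs) := by
  funext pairs l; cases p l <;> simp

lemma strIsalpha_pair (a b : Char) :
    PySem.Chars.strIsalpha [a, b] = (PySem.Chars.isalpha a && PySem.Chars.isalpha b) := by
  simp [PySem.Chars.strIsalpha]

lemma pA_p_succ (a : Char) (cs : List Char) (k : Nat) : pA_p (a :: cs) (k + 1) = pA_p cs k := by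
  simp [pA_p]

lemma pA_f_succ (a : Char) (cs : List Char) (k : Nat) : pA_f (a :: cs) (k + 1) = pA_f cs k := by
  simp [pA_f]

lemma natClosed : ∀ cs : List Char,
    ((List.range (cs.length - 1)).filter (pA_p cs)).map (pA_f cs) = pairsA cs := by
  intro cs
  induction cs with
  | nil => simp [pairsA]
  | cons a t ih =>
    cases t with
    | nil => simp [pairsA]
    | cons b t' =>
      have tail_eq :
          (((List.range t'.length).map Nat.succ).filter (pA_p (a :: b :: t'))).map
            (pA_f (a :: b :: t')) = pairsA (b :: t') := by
        rw [List.filter_map, List.map_map]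
        rw [List.filter_congr (fun k _ => by
              show (pA_p (a :: b :: t') ∘ Nat.succ) k = pA_p (b :: t') k
              simp [Function.comp, pA_p_succ])]
        rw [List.map_congr_left (fun k _ => by
              show (pA_f (a :: b :: t') ∘ Nat.succ) k = pA_f (b :: t') k
              simp [Function.comp, pA_f_succ])]
        simpa using ih
      have h0 : pA_p (a :: b :: t') 0 = (PySem.Chars.isalpha a && PySem.Chars.isalpha b) := by
        simp [pA_p, strIsalpha_pair]
      rw [show (a :: b :: t').length - 1 = t'.length + 1 by simp, List.range_succ_eq_map,
        List.filter_cons]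
      rw [pairsA, ← tail_eq, h0]
      cases h : (PySem.Chars.isalpha a && PySem.Chars.isalpha b) <;>
        simp [pA_f, List.getD]

lemma A_eq (s : String) : pair_list_py s = pairsA s.toList := by
  unfold pair_list_py
  rw [step_flip, PySem.List.foldl_append_if, List.nil_append]
  have hlen : PySem.Str.len s = (s.toList.length : Int) := by simp [PySem.Str.len_eq]
  rw [hlen]
  cases hcs : s.toList with
  | nil =>
    have hr : PySem.List.pyRange 0 ((([] : List Char).length : Int) - 1) = [] := by decide
    rw [hr]; simp [pairsA]
  | cons a t =>
    have h1 : ((a :: t).length : Int) - 1 = (((a :: t).length - 1 : Nat) : Int) := by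
      simp
    rw [h1, PySem.List.pyRange_zero_natCast, List.filter_map, List.map_map]
    rw [List.filter_congr (fun k _ => by
          show ((fun l : Int => PySem.Chars.strIsalpha
              [PySem.List.pyGetD (a :: t) l ' ', PySem.List.pyGetD (a :: t) (l + 1) ' ']) ∘
              (fun k : Nat => (k : Int))) k = pA_p (a :: t) k
          have hk : ((k : Int) + 1) = ((k + 1 : Nat) : Int) := by push_cast; ring
          simp only [Function.comp, pA_p]
          rw [hk, PySem.List.pyGetD_natCast, PySem.List.pyGetD_natCast])]
    rw [List.map_congr_left (fun k _ => by
          show ((fun l : Int => String.ofList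
              [PySem.List.pyGetD (a :: t) l ' ', PySem.List.pyGetD (a :: t) (l + 1) ' ']) ∘
              (fun k : Nat => (k : Int))) k = pA_f (a :: t) k
          have hk : ((k : Int) + 1) = ((k + 1 : Nat) : Int) := by push_cast; ring
          simp only [Function.comp, pA_f]
          rw [hk, PySem.List.pyGetD_natCast, PySem.List.pyGetD_natCast])]
    exact natClosed (a :: t)

lemma pairsA_nonalpha (c : Char) (h : PySem.Chars.isalpha c = false) (t : List Char) :
    pairsA (c :: t) = pairsA t := by
  cases t <;> simp [pairsA, h]

lemma pairsA_break (c : Char) (h : PySem.Chars.isalpha c = false) :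
    ∀ xs t : List Char, pairsA (xs ++ c :: t) = pairsA xs ++ pairsA t := by
  intro xs
  induction xs with
  | nil => intro t; simp [pairsA, pairsA_nonalpha c h]
  | cons x xs ih =>
    intro t
    cases xs with
    | nil => simp [pairsA, h, pairsA_nonalpha c h]
    | cons y xs' =>
      have := ih t
      simp only [List.cons_append] at this ⊢
      rw [pairsA, this, pairsA, List.append_assoc]

lemma runPairs_eq (run : List Char) (h : ∀ c ∈ run, PySem.Chars.isalpha c = true) :
    pvRunPairs run = pairsA run := by
  induction run with
  | nil => simp [pvRunPairs, pairsA]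
  | cons a t ih =>
    cases t with
    | nil => simp [pvRunPairs, pairsA]
    | cons b t' =>
      have ha : PySem.Chars.isalpha a = true := h a (by simp)
      have hb : PySem.Chars.isalpha b = true := h b (by simp)
      have ih' := ih (fun c hc => h c (List.mem_cons_of_mem _ hc))
      simp only [pvRunPairs, List.tail_cons, List.zip_cons_cons, List.map_cons] at ih' ⊢
      rw [pairsA, ih', ha, hb]
      simp

lemma pvRuns_eq : ∀ (cs cur : List Char), (∀ c ∈ cur, PySem.Chars.isalpha c = true) →
    (pvRuns cs cur).flatMap pvRunPairs = pairsA (cur ++ cs) := by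
  intro cs
  induction cs with
  | nil =>
    intro cur h
    by_cases hc : cur = []
    · simp [pvRuns, hc, pairsA]
    · simp [pvRuns, List.isEmpty_iff, hc, runPairs_eq cur h]
  | cons c t ih =>
    intro cur h
    by_cases hca : PySem.Chars.isalpha c
    · rw [pvRuns]
      simp only [hca, if_true]
      rw [ih (cur ++ [c]) (by
        intro x hx
        rcases List.mem_append.mp hx with h1 | h1
        · exact h x h1
        · simp at h1; subst h1; exact hca)]
      simp
    · have hca' : PySem.Chars.isalpha c = false := by simpa using hca
      rw [pvRuns]
      simp only [hca', Bool.false_eq_true, if_false]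
      by_cases hc : cur = []
      · simp [hc, ih [] (by simp), pairsA_nonalpha c hca']
      · simp only [List.isEmpty_iff, hc, if_false, List.flatMap_cons,
          ih [] (by simp), List.nil_append]
        rw [runPairs_eq cur h, pairsA_break c hca']

lemma B_eq (s : String) : pair_list_py_alt s = pairsA s.toList := by
  unfold pair_list_py_alt
  rw [pvRuns_eq s.toList [] (by simp)]
  simp

-- ===== VERDICT (by name: the statement is the Claim_ definition above) =====
theorem pair_list_py_spec : Claim_equal_pair_list_py := by
  intro s _
  unfold Spec_pair_list_py
  rw [A_eq, B_eq]
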